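-- pv_equiv track=rewrite | github.com/peppone-choi/hoi4-modding-agent | hoi4_agent/core/hoi4_generator.py | validate_pdx_braces
-- ===== SOURCE A (Python) =====
-- def parse_pdx_to_tokens(text: str) -> list[str]:
--     """PDX 스크립트를 토큰 리스트로 분리한다 (검증용).
--
--     토큰: 식별자, 문자열리터럴, ``=``, ``{``, ``}``.
--     주석(``#``)은 제거한다.
--     """
--     tokens: list[str] = []
--     i = 0
--     n = len(text)
--     while i < n:
--         c = text[i]
--         # 공백/줄바꿈 건너뛰기
--         if c in " \t\r\n":
--             i += 1
--             continue
--         # 주석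
--         if c == "#":
--             while i < n and text[i] != "\n":
--                 i += 1
--             continue
--         # 구조 문자
--         if c in "={}":
--             tokens.append(c)
--             i += 1
--             continue
--         # 따옴표 문자열
--         if c == '"':
--             j = i + 1
--             while j < n and text[j] != '"':
--                 if text[j] == "\\":
--                     j += 1  # 이스케이프
--                 j += 1
--             tokens.append(text[i : j + 1])
--             i = j + 1
--             continue
--         # 식별자 / 숫자
--         j = i
--         while j < n and text[j] not in " \t\r\n={}#\"":
--             j += 1
--         tokens.append(text[i:j])
--         i = j
--     return tokens
--
-- def validate_pdx_braces(text: str) -> bool: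
--     """중괄호 균형 검증. 불균형이면 False."""
--     depth = 0
--     for tok in parse_pdx_to_tokens(text):
--         if tok == "{":
--             depth += 1
--         elif tok == "}":
--             depth -= 1
--             if depth < 0:
--                 return False
--     return depth == 0
-- ===== SOURCE B (Python) =====
-- def validate_pdx_braces(text: str) -> bool:
--     """중괄호 균형 검증. 불균형이면 False."""
--     depth = 0
--     i = 0
--     n = len(text)
--     while i < n:
--         c = text[i]
--         if c == "#":
--             while i < n and text[i] != "\n":
--                 i += 1
--         elif c == '"':
--             i += 1
--             while i < n and text[i] != '"':
--                 i += 2 if text[i] == "\\" else 1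
--             i += 1
--         elif c == "{":
--             depth += 1
--             i += 1
--         elif c == "}":
--             depth -= 1
--             if depth < 0:
--                 return False
--             i += 1
--         else:
--             i += 1
--     return depth == 0
-- ===== Notes on version B (the rewrite author's own statement) =====
-- stated objective: simpler
-- what changed: A tokenizes the whole text into a materialized token list (with whitespace splitting, '=' tokens and token substrings) and then folds over the tokens counting braces; B is a single character-level scan that keeps only an index and a depth counter, skipping comments and quoted strings in place and never building tokens.
import Mathlib
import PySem

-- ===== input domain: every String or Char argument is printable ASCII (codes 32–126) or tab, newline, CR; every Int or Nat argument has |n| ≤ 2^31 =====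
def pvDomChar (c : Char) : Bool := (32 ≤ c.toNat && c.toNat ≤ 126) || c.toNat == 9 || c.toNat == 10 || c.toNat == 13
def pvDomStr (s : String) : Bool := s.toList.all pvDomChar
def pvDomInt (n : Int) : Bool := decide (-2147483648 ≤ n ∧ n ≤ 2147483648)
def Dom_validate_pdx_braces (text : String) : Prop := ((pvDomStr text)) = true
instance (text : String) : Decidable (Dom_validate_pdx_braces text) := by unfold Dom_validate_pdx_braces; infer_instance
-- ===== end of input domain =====

-- B replaces A's tokenizer-then-count decomposition by a single character-level scanner with no token list.


-- ===== PORT A =====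
-- A's comment loop: while i < n and text[i] != '\n': i += 1
def pdxSkipCommentA : List Char → List Char
  | [] => []
  | c :: r => if c = '\n' then c :: r else pdxSkipCommentA r

theorem pdxSkipCommentA_len (l : List Char) : (pdxSkipCommentA l).length ≤ l.length := by
  induction l with
  | nil => simp [pdxSkipCommentA]
  | cons c r ih => simp only [pdxSkipCommentA]; split
                   · simp
                   · simpa using Nat.le_succ_of_le ih

-- A's quoted-string loop (after the opening quote): .1 = token chars after the quote, .2 = rest (i = j + 1)
def pdxScanStrA : List Char → List Char × List Char
  | [] => ([], [])
  | c :: r =>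
    if c = '"' then ([c], r)
    else if c = '\\' then
      match r with
      | [] => ([c], [])
      | d :: r' => (c :: d :: (pdxScanStrA r').1, (pdxScanStrA r').2)
    else (c :: (pdxScanStrA r).1, (pdxScanStrA r).2)
termination_by l => l.length
decreasing_by all_goals (simp only [List.length_cons]; omega)

theorem pdxScanStrA_len : ∀ (N : Nat) (l : List Char), l.length ≤ N →
    (pdxScanStrA l).2.length ≤ l.length := by
  intro N
  induction N with
  | zero =>
    intro l hl
    match l with
    | [] => simp [pdxScanStrA]
    | c :: r => simp at hl
  | succ N ih =>
    intro l hl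
    match l with
    | [] => simp [pdxScanStrA]
    | c :: r =>
      have hr : r.length ≤ N := by simp at hl; omega
      by_cases h1 : c = '"'
      · subst h1; rw [pdxScanStrA.eq_def]; simp
      · by_cases h2 : c = '\\'
        · subst h2
          match r with
          | [] => rw [pdxScanStrA.eq_def]; simp
          | d :: r' =>
            have ihr := ih r' (by simp at hr ⊢; omega)
            rw [pdxScanStrA.eq_def]; simp only [List.length_cons]
            simp; omega
        · have ihr := ih r hr
          rw [pdxScanStrA.eq_def]
          simp [h1, h2]; omega

-- A's identifier loop: while j < n and text[j] not in " \t\r\n={}#\""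
def pdxIsDelim (c : Char) : Bool :=
  c = ' ' || c = '\t' || c = '\r' || c = '\n' || c = '=' || c = '{' || c = '}' || c = '#' || c = '"'

def pdxScanIdentA : List Char → List Char × List Char
  | [] => ([], [])
  | c :: r =>
    if pdxIsDelim c then ([], c :: r)
    else (c :: (pdxScanIdentA r).1, (pdxScanIdentA r).2)

theorem pdxScanIdentA_len (l : List Char) : (pdxScanIdentA l).2.length ≤ l.length := by
  induction l with
  | nil => simp [pdxScanIdentA]
  | cons c r ih =>
    simp only [pdxScanIdentA]; split
    · simp
    · simpa using Nat.le_succ_of_le ih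

-- parse_pdx_to_tokens
def pdxTokensA : List Char → List String
  | [] => []
  | c :: r =>
    if c = ' ' ∨ c = '\t' ∨ c = '\r' ∨ c = '\n' then pdxTokensA r
    else if c = '#' then pdxTokensA (pdxSkipCommentA r)
    else if c = '=' ∨ c = '{' ∨ c = '}' then String.ofList [c] :: pdxTokensA r
    else if c = '"' then
      String.ofList ('"' :: (pdxScanStrA r).1) :: pdxTokensA (pdxScanStrA r).2
    else
      String.ofList (c :: (pdxScanIdentA r).1) :: pdxTokensA (pdxScanIdentA r).2
termination_by l => l.length
decreasing_by
  · simp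
  · exact Nat.lt_succ_of_le (pdxSkipCommentA_len r)
  · simp
  · exact Nat.lt_succ_of_le (pdxScanStrA_len r.length r le_rfl)
  · exact Nat.lt_succ_of_le (pdxScanIdentA_len r)

-- the depth loop of validate_pdx_braces (the early `return False` is the `false` branch)
def pdxCountA : List String → Int → Bool
  | [], depth => depth == 0
  | tok :: ts, depth =>
    if tok = "{" then pdxCountA ts (depth + 1)
    else if tok = "}" then
      if depth - 1 < 0 then false else pdxCountA ts (depth - 1)
    else pdxCountA ts depth

def validate_pdx_braces (text : String) : Bool :=
  pdxCountA (pdxTokensA text.toList) 0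

-- ===== PORT B =====
-- B's comment loop: while i < n and text[i] != '\n': i += 1 (started at the '#')
def pdxSkipLineB : List Char → List Char
  | [] => []
  | c :: r => if c = '\n' then c :: r else pdxSkipLineB r

theorem pdxSkipLineB_len (l : List Char) : (pdxSkipLineB l).length ≤ l.length := by
  induction l with
  | nil => simp [pdxSkipLineB]
  | cons c r ih => simp only [pdxSkipLineB]; split
                   · simp
                   · simpa using Nat.le_succ_of_le ih

-- B's quoted-string loop after the opening quote (i += 2 on a backslash), including the final i += 1
def pdxSkipStrB : List Char → List Char
  | [] => []
  | c :: r =>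
    if c = '"' then r
    else if c = '\\' then
      match r with
      | [] => []
      | _ :: r' => pdxSkipStrB r'
    else pdxSkipStrB r
termination_by l => l.length
decreasing_by all_goals (simp only [List.length_cons]; omega)

theorem pdxSkipStrB_len : ∀ (N : Nat) (l : List Char), l.length ≤ N →
    (pdxSkipStrB l).length ≤ l.length := by
  intro N
  induction N with
  | zero =>
    intro l hl
    match l with
    | [] => simp [pdxSkipStrB]
    | c :: r => simp at hl
  | succ N ih =>
    intro l hl
    match l with
    | [] => simp [pdxSkipStrB]
    | c :: r =>
      have hr : r.length ≤ N := by simp at hl; omega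
      by_cases h1 : c = '"'
      · subst h1; rw [pdxSkipStrB.eq_def]; simp
      · by_cases h2 : c = '\\'
        · subst h2
          match r with
          | [] => rw [pdxSkipStrB.eq_def]; simp
          | d :: r' =>
            have ihr := ih r' (by simp at hr ⊢; omega)
            rw [pdxSkipStrB.eq_def]; simp; omega
        · have ihr := ih r hr
          rw [pdxSkipStrB.eq_def]
          simp [h1, h2]; omega

def pdxScanB : List Char → Int → Bool
  | [], depth => depth == 0
  | c :: r, depth =>
    if c = '#' then pdxScanB (pdxSkipLineB (c :: r)) depth
    else if c = '"' then pdxScanB (pdxSkipStrB r) depth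
    else if c = '{' then pdxScanB r (depth + 1)
    else if c = '}' then
      if depth - 1 < 0 then false else pdxScanB r (depth - 1)
    else pdxScanB r depth
termination_by l _ => l.length
decreasing_by
  · rename_i h
    have he : pdxSkipLineB (c :: r) = pdxSkipLineB r := by
      subst h; rw [pdxSkipLineB.eq_def]; simp
    rw [he]
    exact Nat.lt_succ_of_le (pdxSkipLineB_len r)
  · exact Nat.lt_succ_of_le (pdxSkipStrB_len r.length r le_rfl)
  · simp
  · simp
  · simp

def validate_pdx_braces_alt (text : String) : Bool :=
  pdxScanB text.toList 0

-- ===== PRECONDITION & SPEC =====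
def Spec_validate_pdx_braces (text : String) (out : Bool) : Prop := out = validate_pdx_braces_alt text
instance (text : String) (out : Bool) : Decidable (Spec_validate_pdx_braces text out) := by unfold Spec_validate_pdx_braces; infer_instance

-- ===== CLAIM (what is proved, stated in full; the proofs are below) =====
def Claim_equal_validate_pdx_braces : Prop := ∀ (text : String), Dom_validate_pdx_braces text → Spec_validate_pdx_braces text (validate_pdx_braces text)

-- ===== LEMMAS AND PROOFS =====

theorem skipLine_eq (l : List Char) : pdxSkipLineB l = pdxSkipCommentA l := by
  induction l with
  | nil => rfl
  | cons c r ih => simp only [pdxSkipLineB, pdxSkipCommentA]; split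
                   · rfl
                   · exact ih

theorem skipStr_eq : ∀ (N : Nat) (l : List Char), l.length ≤ N →
    pdxSkipStrB l = (pdxScanStrA l).2 := by
  intro N
  induction N with
  | zero =>
    intro l hl
    match l with
    | [] => rw [pdxSkipStrB.eq_def, pdxScanStrA.eq_def]
    | c :: r => simp at hl
  | succ N ih =>
    intro l hl
    match l with
    | [] => rw [pdxSkipStrB.eq_def, pdxScanStrA.eq_def]
    | c :: r =>
      have hr : r.length ≤ N := by simp at hl; omega
      by_cases h1 : c = '"'
      · subst h1; rw [pdxSkipStrB.eq_def, pdxScanStrA.eq_def]; simp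
      · by_cases h2 : c = '\\'
        · subst h2
          match r with
          | [] => rw [pdxSkipStrB.eq_def, pdxScanStrA.eq_def]; simp
          | d :: r' =>
            have ihr := ih r' (by simp at hr ⊢; omega)
            rw [pdxSkipStrB.eq_def, pdxScanStrA.eq_def]; simpa using ihr
        · have ihr := ih r hr
          rw [pdxSkipStrB.eq_def, pdxScanStrA.eq_def]
          simp [h1, h2]; exact ihr

-- every non-delimiter character lands in B's final else branch
theorem scanB_skip_ident (l : List Char) (d : Int) :
    pdxScanB l d = pdxScanB (pdxScanIdentA l).2 d := by
  induction l with
  | nil => rfl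
  | cons c r ih =>
    by_cases hd : pdxIsDelim c
    · simp [pdxScanIdentA, hd]
    · have h1 : ¬ c = '#' := by intro h; simp [pdxIsDelim, h] at hd
      have h2 : ¬ c = '"' := by intro h; simp [pdxIsDelim, h] at hd
      have h3 : ¬ c = '{' := by intro h; simp [pdxIsDelim, h] at hd
      have h4 : ¬ c = '}' := by intro h; simp [pdxIsDelim, h] at hd
      rw [pdxScanB.eq_def]
      simp only [if_neg h1, if_neg h2, if_neg h3, if_neg h4, pdxScanIdentA, hd,
        Bool.false_eq_true, if_false]
      exact ih

theorem ofList_ne_brace (c : Char) (t : List Char) (c' : Char) (hcc : ¬ c = c')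
    (hs : String.ofList [c'] = s) : ¬ String.ofList (c :: t) = s := by
  subst hs
  intro he
  have := congrArg String.toList he
  simp at this
  exact hcc this.1

theorem main_equiv : ∀ (N : Nat) (l : List Char), l.length ≤ N →
    ∀ d, pdxCountA (pdxTokensA l) d = pdxScanB l d := by
  intro N
  induction N with
  | zero =>
    intro l hl d
    match l with
    | [] => rw [pdxTokensA.eq_def, pdxScanB.eq_def]; rfl
    | c :: r => simp at hl
  | succ N ih =>
    intro l hl d
    match l with
    | [] => rw [pdxTokensA.eq_def, pdxScanB.eq_def]; rfl
    | c :: r =>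
      have hr : r.length ≤ N := by simp at hl; omega
      by_cases hws : c = ' ' ∨ c = '\t' ∨ c = '\r' ∨ c = '\n'
      · have h1 : ¬ c = '#' := by rcases hws with h|h|h|h <;> simp [h]
        have h2 : ¬ c = '"' := by rcases hws with h|h|h|h <;> simp [h]
        have h3 : ¬ c = '{' := by rcases hws with h|h|h|h <;> simp [h]
        have h4 : ¬ c = '}' := by rcases hws with h|h|h|h <;> simp [h]
        rw [pdxTokensA.eq_def, pdxScanB.eq_def]
        simp only [if_pos hws, if_neg h1, if_neg h2, if_neg h3, if_neg h4]
        exact ih r hr d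
      · by_cases h1 : c = '#'
        · subst h1
          rw [pdxTokensA.eq_def, pdxScanB.eq_def]
          simp only [if_neg hws]
          have he : pdxSkipLineB ('#' :: r) = pdxSkipCommentA r := by
            rw [skipLine_eq]
            rw [pdxSkipCommentA.eq_def]; simp
          rw [he]
          exact ih (pdxSkipCommentA r) (le_trans (pdxSkipCommentA_len r) hr) d
        · by_cases hs : c = '=' ∨ c = '{' ∨ c = '}'
          · rcases hs with h|h|h
            · have hq : ¬ c = '"' := by simp [h]
              have ho : ¬ c = '{' := by simp [h]
              have hc : ¬ c = '}' := by simp [h]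
              rw [pdxTokensA.eq_def, pdxScanB.eq_def]
              simp only [if_neg hws, if_neg h1,
                if_pos (show c = '=' ∨ c = '{' ∨ c = '}' from Or.inl h),
                if_neg hq, if_neg ho, if_neg hc]
              subst h
              rw [pdxCountA, if_neg (show ¬(String.ofList ['='] : String) = "{" from by decide),
                if_neg (show ¬(String.ofList ['='] : String) = "}" from by decide)]
              exact ih r hr d
            · have hq : ¬ c = '"' := by simp [h]
              rw [pdxTokensA.eq_def, pdxScanB.eq_def]
              simp only [if_neg hws, if_neg h1,
                if_pos (show c = '=' ∨ c = '{' ∨ c = '}' from Or.inr (Or.inl h)),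
                if_neg hq, if_pos h]
              subst h
              rw [pdxCountA, if_pos (show (String.ofList ['{'] : String) = "{" from by decide)]
              exact ih r hr (d + 1)
            · have hq : ¬ c = '"' := by simp [h]
              have ho : ¬ c = '{' := by simp [h]
              rw [pdxTokensA.eq_def, pdxScanB.eq_def]
              simp only [if_neg hws, if_neg h1,
                if_pos (show c = '=' ∨ c = '{' ∨ c = '}' from Or.inr (Or.inr h)),
                if_neg hq, if_neg ho, if_pos h]
              subst h
              rw [pdxCountA, if_neg (show ¬(String.ofList ['}'] : String) = "{" from by decide),
                if_pos (show (String.ofList ['}'] : String) = "}" from by decide)]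
              by_cases hneg : d - 1 < 0
              · rw [if_pos hneg, if_pos hneg]
              · rw [if_neg hneg, if_neg hneg]
                exact ih r hr (d - 1)
          · by_cases h2 : c = '"'
            · rw [pdxTokensA.eq_def, pdxScanB.eq_def]
              simp only [if_neg hws, if_neg h1, if_neg hs, if_pos h2]
              rw [skipStr_eq r.length r le_rfl]
              rw [pdxCountA,
                if_neg (ofList_ne_brace '"' _ '{' (by decide) (by decide)),
                if_neg (ofList_ne_brace '"' _ '}' (by decide) (by decide))]
              exact ih (pdxScanStrA r).2 (le_trans (pdxScanStrA_len r.length r le_rfl) hr) d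
            · have h3 : ¬ c = '{' := fun h => hs (Or.inr (Or.inl h))
              have h4 : ¬ c = '}' := fun h => hs (Or.inr (Or.inr h))
              rw [pdxTokensA.eq_def, pdxScanB.eq_def]
              simp only [if_neg hws, if_neg h1, if_neg hs, if_neg h2,
                if_neg h3, if_neg h4]
              rw [scanB_skip_ident r d]
              rw [pdxCountA,
                if_neg (ofList_ne_brace c _ '{' h3 (by decide)),
                if_neg (ofList_ne_brace c _ '}' h4 (by decide))]
              exact ih (pdxScanIdentA r).2 (le_trans (pdxScanIdentA_len r) hr) d

-- ===== VERDICT (by name: the statement is the Claim_ definition above) =====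
theorem validate_pdx_braces_spec : Claim_equal_validate_pdx_braces := by
  intro text _
  unfold Spec_validate_pdx_braces validate_pdx_braces validate_pdx_braces_alt
  exact main_equiv text.toList.length text.toList le_rfl 0
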